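-- pv_equiv track=rewrite | github.com/oksanatkach/ucu-rule-based | app/NER/NER.py | NER_recursion
-- ===== SOURCE A (Python) =====
-- def NER_recursion(ind, sent, lemma, pos):
--
--     if ind+1 == len(sent):
--         return lemma
--     elif sent[ind+1][1] != pos:
--         return lemma
--     elif sent[ind+1][0].islower():
--         return lemma
--     else:
--         lemma = lemma + ' ' + sent[ind+1][0]
--         return NER_recursion(ind+1, sent, lemma, pos)
-- ===== SOURCE B (Python) =====
-- def NER_recursion(ind, sent, lemma, pos):
--     extra = []
--     for word, tag in sent[ind + 1:]:
--         if tag != pos or word.islower():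
--             break
--         extra.append(word)
--     return ' '.join([lemma] + extra)
-- ===== Notes on version B (the rewrite author's own statement) =====
-- stated objective: idiomatic
-- what changed: B replaces A's tail recursion with index arithmetic by one slice sent[ind+1:], a single collect-until-break loop over that slice, and one ' '.join, and B is total where A raises IndexError.
-- intended difference: On ind < -1 with the whole wrapped tail sent[len(sent)+ind+1:] matching (POS equal, not lowercase) and sent[0] matching too, A's negative indexing wraps past -1 and re-scans the list from position 0, appending already-consumed words a second time (e.g. 'x B A B'), while B returns just the wrapped tail's words ('x B'), the intended span extension. — e.g. on NER_recursion(-2, [("A", "N"), ("B", "N")], "x", "N"): A returns "x B A B", B returns "x B"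
import Mathlib
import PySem

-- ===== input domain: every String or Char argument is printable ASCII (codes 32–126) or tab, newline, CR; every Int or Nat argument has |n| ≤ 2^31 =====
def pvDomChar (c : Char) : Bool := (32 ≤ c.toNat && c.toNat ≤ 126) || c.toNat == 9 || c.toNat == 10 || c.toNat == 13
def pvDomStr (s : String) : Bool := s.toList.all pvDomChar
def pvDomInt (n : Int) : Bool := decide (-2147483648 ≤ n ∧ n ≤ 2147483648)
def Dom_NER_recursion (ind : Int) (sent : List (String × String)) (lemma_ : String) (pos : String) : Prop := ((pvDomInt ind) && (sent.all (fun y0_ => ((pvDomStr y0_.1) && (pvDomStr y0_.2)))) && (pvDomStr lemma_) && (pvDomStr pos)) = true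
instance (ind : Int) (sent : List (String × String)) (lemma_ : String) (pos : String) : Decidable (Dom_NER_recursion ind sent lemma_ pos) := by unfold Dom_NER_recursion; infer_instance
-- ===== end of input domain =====

-- B replaces A's tail recursion by one slice + collect-prefix loop + a single ' '.join; B is total
-- (it returns where A raises on an out-of-range index) and intentionally does not reproduce A's
-- negative-index wraparound re-scan (see D_ below).

-- hand port of Python's str.islower(), exact on the ASCII domain: at least one lowercase
-- letter and no uppercase letter (ASCII cased characters are exactly the letters)
def pyIslower (s : String) : Bool :=
  s.toList.any PySem.Chars.islower && s.toList.all (fun c => !PySem.Chars.isupper c)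

-- ===== PORT A =====
def NER_recursion (ind : Int) (sent : List (String × String)) (lemma_ : String) (pos : String) : String :=
  if ind + 1 = (sent.length : Int) then lemma_
  else
    match h : PySem.List.pyGet? sent (ind + 1) with
    | none => lemma_  -- Python raises IndexError here; excluded by Pre_
    | some tok =>
      if tok.2 ≠ pos then lemma_
      else if pyIslower tok.1 then lemma_
      else NER_recursion (ind + 1) sent (lemma_ ++ " " ++ tok.1) pos
termination_by ((sent.length : Int) - ind).toNat
decreasing_by
  have hr : PySem.Raise.InRange sent.length (ind + 1) := by
    by_contra hc
    rw [← PySem.List.pyGet?_eq_none_iff] at hc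
    simp [hc] at h
  rcases hr with ⟨_, hlt⟩
  omega

-- ===== PORT B =====
-- the for-loop of Source B that collects words until the break condition fires
def collectTail (pos : String) : List (String × String) → List String
  | [] => []
  | p :: rest => if p.2 != pos || pyIslower p.1 then [] else p.1 :: collectTail pos rest

def NER_recursion_alt (ind : Int) (sent : List (String × String)) (lemma_ : String) (pos : String) : String :=
  PySem.Str.join " " (lemma_ :: collectTail pos (PySem.List.slice sent (some (ind + 1)) none))

-- ===== PRECONDITION & SPEC =====
-- Pre_ is exactly the set of inputs on which the Python A returns (everywhere else sent[ind+1] raises IndexError)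
def Pre_NER_recursion (ind : Int) (sent : List (String × String)) (lemma_ : String) (pos : String) : Prop :=
  -(sent.length : Int) - 1 ≤ ind ∧ ind + 1 ≤ (sent.length : Int)
instance (ind : Int) (sent : List (String × String)) (lemma_ : String) (pos : String) : Decidable (Pre_NER_recursion ind sent lemma_ pos) := by unfold Pre_NER_recursion; infer_instance

def pvWitness_NER_recursion : Int × (List (String × String)) × String × String :=
  (0, [("Barack", "NNP"), ("Obama", "NNP")], "Barack", "NNP")

-- On ind < -1 with the whole wrapped tail sent[len+ind+1:] matching (POS equal, not lowercase) and
-- sent[0] matching too, A's Python negative indexing wraps and re-scans the list from position 0,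
-- appending elements a second time, while B returns just the words of the wrapped tail — the
-- intended span extension, since re-appending already-consumed words is an indexing accident.
def D_NER_recursion (ind : Int) (sent : List (String × String)) (lemma_ : String) (pos : String) : Prop :=
  ind + 1 < 0 ∧ -(sent.length : Int) ≤ ind + 1 ∧
  (sent.drop ((sent.length : Int) + (ind + 1)).toNat).all (fun p => p.2 == pos && !pyIslower p.1) = true ∧
  (sent.take 1).all (fun p => p.2 == pos && !pyIslower p.1) = true
instance (ind : Int) (sent : List (String × String)) (lemma_ : String) (pos : String) : Decidable (D_NER_recursion ind sent lemma_ pos) := by unfold D_NER_recursion; infer_instance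

def Spec_NER_recursion (ind : Int) (sent : List (String × String)) (lemma_ : String) (pos : String) (out : String) : Prop := ¬ D_NER_recursion ind sent lemma_ pos → out = NER_recursion_alt ind sent lemma_ pos
instance (ind : Int) (sent : List (String × String)) (lemma_ : String) (pos : String) (out : String) : Decidable (Spec_NER_recursion ind sent lemma_ pos out) := by unfold Spec_NER_recursion; infer_instance

def pvDiffWitness_NER_recursion : Int × (List (String × String)) × String × String :=
  (-2, [("A", "N"), ("B", "N")], "x", "N")
def pvDiffWitnessOut_NER_recursion : String × String := ("x B A B", "x B")

-- ===== CLAIM (what is proved, stated in full; the proofs are below) =====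
def Claim_unchanged_NER_recursion : Prop := ∀ (ind : Int) (sent : List (String × String)) (lemma_ : String) (pos : String), Dom_NER_recursion ind sent lemma_ pos → Pre_NER_recursion ind sent lemma_ pos → Spec_NER_recursion ind sent lemma_ pos (NER_recursion ind sent lemma_ pos)
def Claim_changed_NER_recursion : Prop := Dom_NER_recursion (pvDiffWitness_NER_recursion.1) (pvDiffWitness_NER_recursion.2.1) (pvDiffWitness_NER_recursion.2.2.1) (pvDiffWitness_NER_recursion.2.2.2) ∧ Pre_NER_recursion (pvDiffWitness_NER_recursion.1) (pvDiffWitness_NER_recursion.2.1) (pvDiffWitness_NER_recursion.2.2.1) (pvDiffWitness_NER_recursion.2.2.2) ∧ D_NER_recursion (pvDiffWitness_NER_recursion.1) (pvDiffWitness_NER_recursion.2.1) (pvDiffWitness_NER_recursion.2.2.1) (pvDiffWitness_NER_recursion.2.2.2) ∧ NER_recursion (pvDiffWitness_NER_recursion.1) (pvDiffWitness_NER_recursion.2.1) (pvDiffWitness_NER_recursion.2.2.1) (pvDiffWitness_NER_recursion.2.2.2) = pvDiffWitnessOut_NER_recursion.1 ∧ NER_recursion_alt (pvDiffWitness_NER_recursion.1)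 (pvDiffWitness_NER_recursion.2.1) (pvDiffWitness_NER_recursion.2.2.1) (pvDiffWitness_NER_recursion.2.2.2) = pvDiffWitnessOut_NER_recursion.2 ∧ pvDiffWitnessOut_NER_recursion.1 ≠ pvDiffWitnessOut_NER_recursion.2
def Claim_exact_NER_recursion : Prop := ∀ (ind : Int) (sent : List (String × String)) (lemma_ : String) (pos : String), Dom_NER_recursion ind sent lemma_ pos → Pre_NER_recursion ind sent lemma_ pos → D_NER_recursion ind sent lemma_ pos → NER_recursion ind sent lemma_ pos ≠ NER_recursion_alt ind sent lemma_ pos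

-- ===== LEMMAS AND PROOFS =====

theorem joinStep (a b : String) (l : List String) :
    PySem.Str.join " " (a :: b :: l) = PySem.Str.join " " ((a ++ " " ++ b) :: l) := by
  cases l with
  | nil =>
      simp [PySem.Str.join, PySem.Chars.join_cons_cons, PySem.Chars.join_singleton,
        String.toList_append]
  | cons c cs =>
      simp [PySem.Str.join, PySem.Chars.join_cons_cons, String.toList_append]

theorem joinSingleton (a : String) : PySem.Str.join " " [a] = a := by
  simp [PySem.Str.join, PySem.Chars.join_singleton, String.ofList_toList]

theorem A_fold (sent : List (String × String)) (pos : String) :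
    ∀ (n : Nat) (ind : Int) (lemma_ : String), 0 ≤ ind + 1 → ind + 1 ≤ (sent.length : Int) →
      n = sent.length - (ind + 1).toNat →
      NER_recursion ind sent lemma_ pos
        = PySem.Str.join " " (lemma_ :: collectTail pos (sent.drop (ind + 1).toNat)) := by
  intro n
  induction n with
  | zero =>
      intro ind lemma_ h0 h1 hn
      have he : ind + 1 = (sent.length : Int) := by omega
      have hd : (ind + 1).toNat = sent.length := by omega
      rw [NER_recursion, if_pos he, hd]
      simp [collectTail, joinSingleton]
  | succ k ih =>
      intro ind lemma_ h0 h1 hn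
      have hlt : ind + 1 < (sent.length : Int) := by omega
      have hne : ¬(ind + 1 = (sent.length : Int)) := hlt.ne
      have hnl : (ind + 1).toNat < sent.length := by omega
      have hg : PySem.List.pyGet? sent (ind + 1)
          = some (sent[(ind + 1).toNat]'hnl) := PySem.List.pyGet?_eq_some_getElem sent h0 hlt
      rw [NER_recursion, if_neg hne]
      rw [List.drop_eq_getElem_cons hnl]
      split
      · next heq => rw [hg] at heq; cases heq
      · next tok heq =>
        rw [hg] at heq
        injection heq with heq
        subst heq
        set t := sent[(ind + 1).toNat]'hnl with ht
        by_cases hp : t.2 ≠ pos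
        · rw [if_pos hp]
          have : (t.2 != pos || pyIslower t.1) = true := by simp [bne_iff_ne, hp]
          simp [collectTail, this, joinSingleton]
        · rw [if_neg hp]
          rw [not_not] at hp
          by_cases hl : pyIslower t.1 = true
          · rw [if_pos hl]
            have : (t.2 != pos || pyIslower t.1) = true := by simp [hl]
            simp [collectTail, this, joinSingleton]
          · rw [if_neg hl]
            have hcond : (t.2 != pos || pyIslower t.1) = false := by
              simp [bne_iff_ne, hp, hl]
            have h2 : (ind + 1 + 1).toNat = (ind + 1).toNat + 1 := by omega
            rw [ih (ind + 1) (lemma_ ++ " " ++ t.1) (by omega) (by omega) (by omega), h2]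
            rw [collectTail]
            simp only [hcond, Bool.false_eq_true, if_false]
            rw [joinStep]

theorem A_neg (sent : List (String × String)) (pos : String) :
    ∀ (m : Nat) (ind : Int) (lemma_ : String), ind + 1 = -(m : Int) → 0 < m → m ≤ sent.length →
      NER_recursion ind sent lemma_ pos
        = if (sent.drop (sent.length - m)).all (fun p => p.2 == pos && !pyIslower p.1) then
            NER_recursion (-1) sent
              (PySem.Str.join " " (lemma_ :: (sent.drop (sent.length - m)).map Prod.fst)) pos
          else
            PySem.Str.join " " (lemma_ :: collectTail pos (sent.drop (sent.length - m))) := by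
  intro m
  induction m with
  | zero => intro ind lemma_ _ h0 _; omega
  | succ k ih =>
      intro ind lemma_ hm h0 hle
      have hne : ¬(ind + 1 = (sent.length : Int)) := by omega
      have hnl : sent.length - (k + 1) < sent.length := by omega
      have hg : PySem.List.pyGet? sent (ind + 1)
          = some (sent[sent.length - (k + 1)]'hnl) := by
        rw [hm, PySem.List.pyGet?_neg_natCast sent (k + 1) (by omega) hle,
          List.getElem?_eq_getElem hnl]
      rw [NER_recursion, if_neg hne]
      rw [List.drop_eq_getElem_cons hnl]
      split
      · next heq => rw [hg] at heq; cases heq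
      · next tok heq =>
        rw [hg] at heq
        injection heq with heq
        subst heq
        set t := sent[sent.length - (k + 1)]'hnl with ht
        by_cases hp : t.2 ≠ pos
        · rw [if_pos hp]
          have hgood : (t.2 == pos && !pyIslower t.1) = false := by
            simp [hp]
          have hcond : (t.2 != pos || pyIslower t.1) = true := by simp [bne_iff_ne, hp]
          simp [hgood, hcond, collectTail, joinSingleton]
        · rw [if_neg hp]
          rw [not_not] at hp
          by_cases hl : pyIslower t.1 = true
          · rw [if_pos hl]
            have hgood : (t.2 == pos && !pyIslower t.1) = false := by simp [hl]
            have hcond : (t.2 != pos || pyIslower t.1) = true := by simp [hl]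
            simp [hgood, hcond, collectTail, joinSingleton]
          · rw [if_neg hl]
            have hgood : (t.2 == pos && !pyIslower t.1) = true := by simp [hp, hl]
            have hcond : (t.2 != pos || pyIslower t.1) = false := by simp [hp, hl]
            rcases Nat.eq_zero_or_pos k with hk0 | hkpos
            · subst hk0
              have hd1 : sent.length - (0 + 1) + 1 = sent.length := by omega
              have hi1 : ind + 1 = -1 := by rw [hm]; norm_num
              rw [hd1, List.drop_length]
              rw [hi1]
              simp only [List.all_cons, List.all_nil, hgood, Bool.and_true, if_true]
              rw [List.map_cons, List.map_nil, joinStep, joinSingleton]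
            · have hd1 : sent.length - (k + 1) + 1 = sent.length - k := by omega
              rw [hd1]
              rw [ih (ind + 1) (lemma_ ++ " " ++ t.1) (by omega) hkpos (by omega)]
              simp only [List.all_cons, hgood, Bool.true_and]
              by_cases hall : (List.drop (sent.length - k) sent).all (fun p => p.2 == pos && !pyIslower p.1) = true
              · rw [if_pos hall, if_pos hall, List.map_cons, joinStep]
              · rw [if_neg hall, if_neg hall]
                rw [collectTail]
                simp only [hcond, Bool.false_eq_true, if_false]
                rw [joinStep]

theorem collect_of_all_good (pos : String) (l : List (String × String))
    (h : l.all (fun p => p.2 == pos && !pyIslower p.1) = true) :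
    collectTail pos l = l.map Prod.fst := by
  induction l with
  | nil => rfl
  | cons p rest ih =>
      simp only [List.all_cons, Bool.and_eq_true, beq_iff_eq, Bool.not_eq_true'] at h
      rw [collectTail, List.map_cons]
      have hcond : (p.2 != pos || pyIslower p.1) = false := by
        simp [h.1.1, h.1.2]
      simp only [hcond, Bool.false_eq_true, if_false]
      rw [ih (by simpa using h.2)]

theorem join_len_le (l : List String) : ∀ (s : String),
    s.toList.length ≤ (PySem.Str.join " " (s :: l)).toList.length := by
  induction l with
  | nil => intro s; rw [joinSingleton]
  | cons w rest ih =>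
      intro s
      rw [joinStep]
      calc s.toList.length ≤ (s ++ " " ++ w).toList.length := by
            simp [String.toList_append]
        _ ≤ _ := ih (s ++ " " ++ w)

theorem join_ne (s w : String) (l : List String) :
    PySem.Str.join " " (s :: w :: l) ≠ s := by
  intro h
  have h1 := join_len_le l (s ++ " " ++ w)
  rw [← joinStep, h] at h1
  simp [String.toList_append] at h1

theorem AB_agree : ∀ (ind : Int) (sent : List (String × String)) (lemma_ : String) (pos : String),
    Pre_NER_recursion ind sent lemma_ pos → ¬ D_NER_recursion ind sent lemma_ pos →
    NER_recursion ind sent lemma_ pos = NER_recursion_alt ind sent lemma_ pos := by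
  intro ind sent lemma_ pos hpre hnd
  obtain ⟨hp1, hp2⟩ := hpre
  unfold NER_recursion_alt
  by_cases h0 : 0 ≤ ind + 1
  · rw [PySem.List.slice_from sent h0]
    exact A_fold sent pos (sent.length - (ind + 1).toNat) ind lemma_ h0 hp2 rfl
  · have hm : ind + 1 = -(((-(ind + 1)).toNat : Nat) : Int) := by omega
    have hm1 : 0 < (-(ind + 1)).toNat := by omega
    have hm2 : (-(ind + 1)).toNat ≤ sent.length := by omega
    set m := (-(ind + 1)).toNat with hmdef
    have hsl : PySem.List.slice sent (some (ind + 1)) none = sent.drop (sent.length - m) := by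
      rw [hm, PySem.List.slice_some_none, PySem.List.clampIdx_neg_natCast _ _ hm1]
    rw [hsl, A_neg sent pos m ind lemma_ hm hm1 hm2]
    by_cases hall : (sent.drop (sent.length - m)).all (fun p => p.2 == pos && !pyIslower p.1) = true
    · rw [if_pos hall]
      -- ¬D_ forces the head of sent to fail the guard
      have hdnat : ((sent.length : Int) + (ind + 1)).toNat = sent.length - m := by omega
      have htk : ¬ (sent.take 1).all (fun p => p.2 == pos && !pyIslower p.1) = true := by
        intro htk
        exact hnd ⟨by omega, by omega, by rw [hdnat]; exact hall, htk⟩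
      cases sent with
      | nil => simp at hm2; omega
      | cons hd tl =>
          have hbad : (hd.2 == pos && !pyIslower hd.1) = false := by
            rcases Bool.eq_false_or_eq_true (hd.2 == pos && !pyIslower hd.1) with h | h
            · exact absurd (by simpa using h) htk
            · exact h
          rw [A_fold (hd :: tl) pos ((hd :: tl).length - 0) (-1) _ (by norm_num) (by omega) (by norm_num)]
          have hcond : (hd.2 != pos || pyIslower hd.1) = true := by
            rcases Bool.and_eq_false_iff.mp hbad with h | h
            · simp [bne_iff_ne, beq_eq_false_iff_ne.mp h]
            · have hx : pyIslower hd.1 = true := by simpa using h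
              simp [hx]
          have h00 : ((-1 : Int) + 1).toNat = 0 := by norm_num
          rw [h00, List.drop_zero, collectTail]
          simp only [hcond, if_true]
          rw [joinSingleton, collect_of_all_good pos _ hall]
    · rw [if_neg hall]

theorem AB_differ : ∀ (ind : Int) (sent : List (String × String)) (lemma_ : String) (pos : String),
    Pre_NER_recursion ind sent lemma_ pos → D_NER_recursion ind sent lemma_ pos →
    NER_recursion ind sent lemma_ pos ≠ NER_recursion_alt ind sent lemma_ pos := by
  intro ind sent lemma_ pos hpre hd
  obtain ⟨hneg, hrange, hall, htk⟩ := hd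
  have hm : ind + 1 = -(((-(ind + 1)).toNat : Nat) : Int) := by omega
  have hm1 : 0 < (-(ind + 1)).toNat := by omega
  have hm2 : (-(ind + 1)).toNat ≤ sent.length := by omega
  set m := (-(ind + 1)).toNat with hmdef
  have hdnat : ((sent.length : Int) + (ind + 1)).toNat = sent.length - m := by omega
  rw [hdnat] at hall
  have hsl : PySem.List.slice sent (some (ind + 1)) none = sent.drop (sent.length - m) := by
    rw [hm, PySem.List.slice_some_none, PySem.List.clampIdx_neg_natCast _ _ hm1]
  have hB : NER_recursion_alt ind sent lemma_ pos
      = PySem.Str.join " " (lemma_ :: (sent.drop (sent.length - m)).map Prod.fst) := by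
    unfold NER_recursion_alt
    rw [hsl, collect_of_all_good pos _ hall]
  rw [A_neg sent pos m ind lemma_ hm hm1 hm2, if_pos hall, hB]
  cases sent with
  | nil => simp at hm2; omega
  | cons hd tl =>
      have hgood : (hd.2 == pos && !pyIslower hd.1) = true := by simpa using htk
      have hcond : (hd.2 != pos || pyIslower hd.1) = false := by
        obtain ⟨h1, h2⟩ := Bool.and_eq_true_iff.mp hgood
        simp [beq_iff_eq.mp h1, show pyIslower hd.1 = false by simpa using h2]
      rw [A_fold (hd :: tl) pos ((hd :: tl).length - 0) (-1) _ (by norm_num) (by omega) (by norm_num)]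
      have h00 : ((-1 : Int) + 1).toNat = 0 := by norm_num
      rw [h00, List.drop_zero, collectTail]
      simp only [hcond, Bool.false_eq_true, if_false]
      exact join_ne _ _ _

-- ===== VERDICT (by name: the statement is the Claim_ definition above) =====
theorem NER_recursion_spec : Claim_unchanged_NER_recursion := by
  intro ind sent lemma_ pos _ hpre
  unfold Spec_NER_recursion
  intro hnd
  exact AB_agree ind sent lemma_ pos hpre hnd

theorem NER_recursion_changed : Claim_changed_NER_recursion := by
  unfold Claim_changed_NER_recursion
  refine ⟨by decide, by decide, by decide, ?_, by decide, by decide⟩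
  show NER_recursion (-2) [("A", "N"), ("B", "N")] "x" "N" = "x B A B"
  simp [NER_recursion, PySem.List.pyGet?, PySem.List.pyIdx?, List.getElem?_cons_zero,
    List.getElem?_cons_succ,
    show pyIslower "B" = false from by decide, show pyIslower "A" = false from by decide]

theorem NER_recursion_tight : Claim_exact_NER_recursion := by
  intro ind sent lemma_ pos _ hpre hd
  exact AB_differ ind sent lemma_ pos hpre hd
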